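-- pv_equiv track=rewrite | github.com/tomdodd4598/farkle-stats | main_no_cache.py | dice_perm_count
-- ===== SOURCE A (Python) =====
-- SIDES = 6
--
-- def range1(n):
--     return range(1, 1 + n)
--
-- def dice_perm_count(roll):
--     res, i = 1, 1
--     for a in range1(SIDES):
--         for j in range1(roll.count(a)):
--             res *= i
--             res //= j
--             i += 1
--     return res
-- ===== SOURCE B (Python) =====
-- def dice_perm_count(roll):
--     def fact(k):
--         f = 1
--         for x in range(2, k + 1):
--             f *= x
--         return f
--     counts = [roll.count(a) for a in range(1, 7)]
--     den = 1
--     for c in counts: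
--         den *= fact(c)
--     return fact(sum(counts)) // den
-- ===== Notes on version B (the rewrite author's own statement) =====
-- stated objective: simpler
-- what changed: Replaces A's interleaved running-product recurrence (res *= i; res //= j across nested loops) with the closed-form multinomial formula: count each side 1..6, then factorial(total) // product of factorials of the counts.
import Mathlib
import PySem

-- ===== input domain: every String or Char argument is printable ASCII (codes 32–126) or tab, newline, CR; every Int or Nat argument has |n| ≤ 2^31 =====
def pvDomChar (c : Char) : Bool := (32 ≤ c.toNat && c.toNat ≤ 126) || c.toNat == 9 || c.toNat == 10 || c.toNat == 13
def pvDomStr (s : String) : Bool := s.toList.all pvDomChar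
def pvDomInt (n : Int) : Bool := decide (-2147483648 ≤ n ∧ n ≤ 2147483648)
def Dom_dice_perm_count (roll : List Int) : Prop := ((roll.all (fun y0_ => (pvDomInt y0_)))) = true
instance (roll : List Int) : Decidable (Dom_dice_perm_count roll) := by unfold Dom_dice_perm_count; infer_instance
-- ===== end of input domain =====

-- B replaces A's interleaved running-product recurrence with the closed-form multinomial
-- expression factorial(total count) // product of factorials of the six side counts (objective: simpler).

-- ===== PORT A =====
-- inner-loop body of A: 'res *= i; res //= j; i += 1' on the state (res, i)
def pvStepA (p : Int × Int) (j : Int) : Int × Int :=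
  (PySem.Int.floordiv (p.1 * p.2) j, p.2 + 1)

def dice_perm_count (roll : List Int) : Int :=
  ((PySem.List.pyRange 1 (1 + 6) 1).foldl
    (fun s a =>
      (PySem.List.pyRange 1 (1 + ((PySem.List.count roll a : Nat) : Int)) 1).foldl pvStepA s)
    (1, 1)).1

-- ===== PORT B =====
-- Source B's helper 'fact': f = 1; for x in range(2, k + 1): f *= x
def pvFact (k : Int) : Int :=
  (PySem.List.pyRange 2 (k + 1) 1).foldl (fun f x => f * x) 1

def dice_perm_count_alt (roll : List Int) : Int :=
  let counts : List Int :=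
    (PySem.List.pyRange 1 7 1).map (fun a => ((PySem.List.count roll a : Nat) : Int))
  let den := counts.foldl (fun d c => d * pvFact c) 1
  PySem.Int.floordiv (pvFact counts.sum) den

-- ===== PRECONDITION & SPEC =====
def Spec_dice_perm_count (roll : List Int) (out : Int) : Prop := out = dice_perm_count_alt roll
instance (roll : List Int) (out : Int) : Decidable (Spec_dice_perm_count roll out) := by unfold Spec_dice_perm_count; infer_instance

-- ===== CLAIM (what is proved, stated in full; the proofs are below) =====
def Claim_equal_dice_perm_count : Prop := ∀ (roll : List Int), Dom_dice_perm_count roll → Spec_dice_perm_count roll (dice_perm_count roll)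

-- ===== LEMMAS AND PROOFS =====

-- the product of binomial coefficients that telescopes to the multinomial coefficient
def pvProdChoose (m : Nat) : List Nat → Nat
  | [] => 1
  | c :: cs => (m + c).choose c * pvProdChoose (m + c) cs

-- Source B's fact is the factorial
theorem pvFact_eq : ∀ k : Nat, pvFact (k : Int) = (k.factorial : Int) := by
  intro k
  induction k with
  | zero => decide
  | succ k ih =>
    cases k with
    | zero => decide
    | succ k =>
      unfold pvFact at ih ⊢
      have h1 : ((k + 1 + 1 : Nat) : Int) + 1 = ((k : Int) + 2) + 1 := by push_cast; ring
      have h2 : ((k + 1 : Nat) : Int) + 1 = (k : Int) + 2 := by push_cast; ring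
      rw [h1, PySem.List.pyRange_one_succ_right (by omega : (2:Int) ≤ (k : Int) + 2),
          List.foldl_append, ← h2, ih]
      simp [Nat.factorial_succ]
      ring

-- A's inner loop multiplies the running result by the binomial coefficient C(m+c, c)
theorem pvInner_eq (R m c : Nat) :
    (PySem.List.pyRange 1 (1 + (c : Int)) 1).foldl pvStepA ((R : Int), (m : Int) + 1)
      = (((R * (m + c).choose c : Nat) : Int), (m : Int) + (c : Int) + 1) := by
  induction c with
  | zero => simp [PySem.List.pyRange_one_eq_nil]
  | succ c ih =>
    have h1 : (1 : Int) + ((c + 1 : Nat) : Int) = (1 + (c : Int)) + 1 := by push_cast; ring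
    rw [h1, PySem.List.pyRange_one_succ_right (by omega : (1:Int) ≤ 1 + (c : Int)),
        List.foldl_append, ih]
    simp only [List.foldl_cons, List.foldl_nil, pvStepA]
    have hid := Nat.add_one_mul_choose_eq (m + c) c
    have hkey : ((R * (m + c).choose c : Nat) : Int) * ((m : Int) + (c : Int) + 1)
        = ((R * (m + (c+1)).choose (c+1) : Nat) : Int) * ((c : Int) + 1) := by
      have hid' : ((m:ℤ) + c + 1) * ((m + c).choose c : ℤ)
          = ((m + c + 1).choose (c+1) : ℤ) * ((c:ℤ) + 1) := by exact_mod_cast hid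
      push_cast
      rw [show m + (c + 1) = m + c + 1 from by ring]
      linear_combination (R : ℤ) * hid'
    rw [Prod.mk.injEq]
    constructor
    · rw [hkey, show (1 : Int) + (c:Int) = (c:Int) + 1 from by ring,
          PySem.Int.floordiv_eq_ediv_of_pos (by omega), Int.mul_ediv_cancel _ (by omega)]
    · push_cast; ring

-- A's outer loop over a list of counts accumulates the telescoping binomial product
theorem pvOuter_eq (cs : List Nat) : ∀ (R m : Nat),
    cs.foldl (fun (s : Int × Int) (c : Nat) => (PySem.List.pyRange 1 (1 + (c : Int)) 1).foldl pvStepA s)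
        ((R : Int), (m : Int) + 1)
      = (((R * pvProdChoose m cs : Nat) : Int), (m : Int) + (cs.sum : Int) + 1) := by
  induction cs with
  | nil => intro R m; simp [pvProdChoose]
  | cons c cs ih =>
    intro R m
    rw [List.foldl_cons]
    rw [pvInner_eq R m c]
    have h : ((m : Int) + (c : Int)) = ((m + c : Nat) : Int) := by push_cast; ring
    rw [h, ih (R * (m + c).choose c) (m + c)]
    simp only [pvProdChoose, List.sum_cons]
    rw [Prod.mk.injEq]
    constructor <;> (push_cast; ring)

-- the multinomial telescoping identity
theorem pvTele (cs : List Nat) : ∀ m : Nat,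
    (m + cs.sum).factorial
      = m.factorial * pvProdChoose m cs * (cs.map Nat.factorial).prod := by
  induction cs with
  | nil => intro m; simp [pvProdChoose]
  | cons c cs ih =>
    intro m
    have h1 : m + (c :: cs).sum = (m + c) + cs.sum := by simp [List.sum_cons]; ring
    rw [h1, ih (m + c)]
    have h2 := Nat.add_choose_mul_factorial_mul_factorial m c
    simp only [pvProdChoose, List.map_cons, List.prod_cons]
    calc (m + c).factorial * pvProdChoose (m + c) cs * (cs.map Nat.factorial).prod
        = ((m + c).choose c * m.factorial * c.factorial) * pvProdChoose (m + c) cs * (cs.map Nat.factorial).prod := by rw [h2]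
      _ = m.factorial * ((m + c).choose c * pvProdChoose (m + c) cs) * (c.factorial * (cs.map Nat.factorial).prod) := by ring

-- B's denominator loop is the product of the factorials of the counts
theorem pvDen_eq (cs : List Nat) : ∀ d : Nat,
    (cs.map (fun c => ((c : Nat) : Int))).foldl (fun d c => d * pvFact c) (d : Int)
      = ((d * (cs.map Nat.factorial).prod : Nat) : Int) := by
  induction cs with
  | nil => intro d; simp
  | cons c cs ih =>
    intro d
    simp only [List.map_cons, List.foldl_cons, pvFact_eq]
    rw [show ((d : Int) * (c.factorial : Int)) = ((d * c.factorial : Nat) : Int) from by push_cast; ring,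
        ih (d * c.factorial)]
    simp only [List.prod_cons]
    push_cast; ring

theorem pvMain (roll : List Int) : dice_perm_count roll = dice_perm_count_alt roll := by
  set cs : List Nat := [PySem.List.count roll 1, PySem.List.count roll 2,
    PySem.List.count roll 3, PySem.List.count roll 4,
    PySem.List.count roll 5, PySem.List.count roll 6] with hcs
  have hA : dice_perm_count roll
      = (cs.foldl (fun (s : Int × Int) (c : Nat) =>
          (PySem.List.pyRange 1 (1 + (c : Int)) 1).foldl pvStepA s)
          (((1 : Nat) : Int), ((0 : Nat) : Int) + 1)).1 := by
    rfl
  have hB : dice_perm_count_alt roll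
      = PySem.Int.floordiv (pvFact ((cs.map (fun c => ((c : Nat) : Int))).sum))
          ((cs.map (fun c => ((c : Nat) : Int))).foldl (fun d c => d * pvFact c) (((1 : Nat)) : Int)) := by
    rfl
  have hsum : (cs.map (fun c => ((c : Nat) : Int))).sum = ((cs.sum : Nat) : Int) := by
    simp [hcs]
  rw [hA, pvOuter_eq cs 1 0, hB, hsum, pvFact_eq, pvDen_eq cs 1]
  have hfac := pvTele cs 0
  simp only [Nat.factorial_zero, one_mul, zero_add] at hfac
  simp only [one_mul]
  rw [hfac]
  have hpos : 0 < (cs.map Nat.factorial).prod := by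
    apply List.prod_pos
    intro x hx
    simp only [List.mem_map] at hx
    obtain ⟨c, _, rfl⟩ := hx
    exact c.factorial_pos
  have hpos' : (0 : Int) < ((cs.map Nat.factorial).prod : Int) := by exact_mod_cast hpos
  rw [PySem.Int.floordiv_eq_ediv_of_pos hpos', Nat.cast_mul,
      Int.mul_ediv_cancel _ (ne_of_gt hpos')]

-- ===== VERDICT (by name: the statement is the Claim_ definition above) =====
theorem dice_perm_count_spec : Claim_equal_dice_perm_count := by
  intro roll _
  exact pvMain roll
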